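-- pv_equiv track=rewrite | github.com/guillaumebour/programme-ocr | src/FonctionsReconnaissance.py | getKMin
-- ===== SOURCE A (Python) =====
-- def getKMin(tab,k):
-- 	"""Retourne les k plus petites valeurs du tableau: [(distance1, i1,j1),(distance2, i2,j2)...]"""
-- 	result = []
--
-- 	# On recherche k fois le minimum, et on le passe à -1:
-- 	for c in range(k):
-- 		dMin = 400 # distance max
-- 		position = (-1,-1)
-- 		for i in range(len(tab)):
-- 			for j in range(len(tab[0])):
-- 				if tab[i][j] < dMin and tab[i][j] != -1:
-- 					dMin = tab[i][j]
-- 					position = (i,j)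
--
-- 		result.append((dMin,position[0],position[1]))
-- 		tab[position[0]][position[1]] = -1
--
-- 	return result
-- ===== SOURCE B (Python) =====
-- def getKMin(tab, k):
--     """Retourne les k plus petites valeurs du tableau: [(distance1, i1,j1),(distance2, i2,j2)...]"""
--     # Collect every valid cell once, sort, take the k smallest, pad with (400,-1,-1).
--     # (Unlike the original, this does not modify tab in place.)
--     cells = [(v, i, j) for i, row in enumerate(tab) for j, v in enumerate(row)
--              if v < 400 and v != -1]
--     cells.sort()
--     n = max(k, 0)
--     return cells[:n] + [(400, -1, -1)] * (n - len(cells))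
-- ===== Notes on version B (the rewrite author's own statement) =====
-- stated objective: faster
-- what changed: Instead of k full scans of the grid, each extracting one minimum and destroying it in place, B collects all valid cells once, sorts them by (value, row, col), takes the first k and pads with (400,-1,-1); B also leaves tab unmutated.
-- outside the precondition, e.g. on getKMin([[5], [7, 1]], 1): A returns [(5, 0, 0)], B returns [(1, 1, 1)]
import Mathlib
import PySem

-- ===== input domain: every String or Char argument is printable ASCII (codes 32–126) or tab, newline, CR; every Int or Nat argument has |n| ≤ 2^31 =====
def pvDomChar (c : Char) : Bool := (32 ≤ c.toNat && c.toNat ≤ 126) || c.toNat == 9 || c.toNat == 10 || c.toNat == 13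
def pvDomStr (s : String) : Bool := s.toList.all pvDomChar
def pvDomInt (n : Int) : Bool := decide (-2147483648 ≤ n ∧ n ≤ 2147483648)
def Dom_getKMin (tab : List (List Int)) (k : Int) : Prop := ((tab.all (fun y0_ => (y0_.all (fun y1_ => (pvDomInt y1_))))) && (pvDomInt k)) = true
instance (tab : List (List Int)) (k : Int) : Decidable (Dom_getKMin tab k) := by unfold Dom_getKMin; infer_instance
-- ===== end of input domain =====

-- B replaces A's k destructive full-grid scans by one collect-sort-take pass (asymptotically
-- faster); equivalence is about the RETURN value only: A mutates tab in place, B does not.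

-- ===== PORT A =====
-- inner double scan: for i in range(len(tab)): for j in range(len(tab[0])): …
def pvScanA (tab : List (List Int)) : Int × Int × Int :=
  (PySem.List.pyRange 0 (PySem.List.len tab) 1).foldl (fun s i =>
    (PySem.List.pyRange 0 (PySem.List.len (PySem.List.pyGetD tab 0 [])) 1).foldl (fun s j =>
      if PySem.List.pyGetD (PySem.List.pyGetD tab i []) j 0 < s.1 ∧
         PySem.List.pyGetD (PySem.List.pyGetD tab i []) j 0 ≠ -1 then
        (PySem.List.pyGetD (PySem.List.pyGetD tab i []) j 0, i, j)
      else s) s)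
    (400, -1, -1)

-- for c in range(k): … result.append(…); tab[position[0]][position[1]] = -1
def pvLoopA : Nat → List (List Int) → List (Int × Int × Int) → List (Int × Int × Int)
  | 0, _, result => result
  | n+1, tab, result =>
    let s := pvScanA tab
    pvLoopA n
      (PySem.List.pySetD tab s.2.1 (PySem.List.pySetD (PySem.List.pyGetD tab s.2.1 []) s.2.2 (-1)))
      (result ++ [(s.1, s.2.1, s.2.2)])

def getKMin (tab : List (List Int)) (k : Int) : List (Int × Int × Int) :=
  pvLoopA k.toNat tab []

-- ===== PORT B =====
-- Python's lexicographic comparison of (v, i, j) tuples, as the sort key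
def pvKey (c : Int × Int × Int) : Int ×ₗ Int ×ₗ Int := toLex (c.1, toLex (c.2.1, c.2.2))

def getKMin_alt (tab : List (List Int)) (k : Int) : List (Int × Int × Int) :=
  -- cells = [(v, i, j) for i, row in enumerate(tab) for j, v in enumerate(row) if …]
  let cells := (PySem.List.enumerate tab 0).flatMap (fun p =>
    ((PySem.List.enumerate p.2 0).filter (fun q => decide (q.2 < 400 ∧ q.2 ≠ -1))).map
      (fun q => (q.2, p.1, q.1)))
  -- cells.sort()  (tuple comparison = lexicographic)
  let cells := PySem.List.sorted cells pvKey false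
  let n := max k 0
  -- cells[:n] + [(400, -1, -1)] * (n - len(cells))
  PySem.List.slice cells none (some n) ++
    PySem.List.pyRepeat [((400 : Int), (-1 : Int), (-1 : Int))] (n - PySem.List.len cells)

-- ===== PRECONDITION & SPEC =====
-- Pre_ restricts to non-empty rectangular grids (any grid when k ≤ 0), the function's natural
-- 2-D-array domain: on ragged/empty input A either raises IndexError (a later row shorter than
-- row 0, or tab/its last row empty with k > 0) or, when later rows are longer than row 0, it
-- silently scans only the first len(tab[0]) columns — an artifact of its range(len(tab[0])) bound.
def Pre_getKMin (tab : List (List Int)) (k : Int) : Prop :=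
  k ≤ 0 ∨ (tab ≠ [] ∧ (tab.headD []) ≠ [] ∧ ∀ r ∈ tab, r.length = (tab.headD []).length)
instance (tab : List (List Int)) (k : Int) : Decidable (Pre_getKMin tab k) := by
  unfold Pre_getKMin; infer_instance

def pvWitness_getKMin : List (List Int) × Int := ([[3, 1], [4, 1]], 2)

def Spec_getKMin (tab : List (List Int)) (k : Int) (out : List (Int × Int × Int)) : Prop := out = getKMin_alt tab k
instance (tab : List (List Int)) (k : Int) (out : List (Int × Int × Int)) : Decidable (Spec_getKMin tab k out) := by unfold Spec_getKMin; infer_instance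

-- ===== CLAIM (what is proved, stated in full; the proofs are below) =====
def Claim_equal_getKMin : Prop := ∀ (tab : List (List Int)) (k : Int), Dom_getKMin tab k → Pre_getKMin tab k → Spec_getKMin tab k (getKMin tab k)

-- ===== LEMMAS AND PROOFS =====

-- the cell list in row-major order, and its valid part
def pvRow (i : Int) (row : List Int) : List (Int × Int × Int) :=
  (PySem.List.enumerate row 0).map (fun q => (q.2, i, q.1))

def pvCellsFrom (s : Int) (tab : List (List Int)) : List (Int × Int × Int) :=
  (PySem.List.enumerate tab s).flatMap (fun p => pvRow p.1 p.2)

def pvCells (tab : List (List Int)) : List (Int × Int × Int) := pvCellsFrom 0 tab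

def pvValidB (c : Int × Int × Int) : Bool := decide (c.1 < 400 ∧ c.1 ≠ -1)

def pvV (tab : List (List Int)) : List (Int × Int × Int) := (pvCells tab).filter pvValidB

def pvPosLt (a b : Int × Int × Int) : Prop :=
  a.2.1 < b.2.1 ∨ (a.2.1 = b.2.1 ∧ a.2.2 < b.2.2)

def pvStep (s c : Int × Int × Int) : Int × Int × Int :=
  if c.1 < s.1 ∧ c.1 ≠ -1 then c else s

-- the cell update performed by tab[i0][j0] = v
def pvUpd (i0 j0 v : Int) (c : Int × Int × Int) : Int × Int × Int :=
  if c.2.1 = i0 ∧ c.2.2 = j0 then (v, c.2) else c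

lemma pvKey_inj {a b : Int × Int × Int} (h : pvKey a = pvKey b) : a = b := by
  simp only [pvKey, toLex_inj, Prod.mk.injEq] at h
  obtain ⟨h1, h2, h3⟩ := h
  exact Prod.ext h1 (Prod.ext h2 h3)

lemma pvKey_le_iff (a b : Int × Int × Int) :
    pvKey a ≤ pvKey b ↔
      a.1 < b.1 ∨ (a.1 = b.1 ∧ (a.2.1 < b.2.1 ∨ (a.2.1 = b.2.1 ∧ a.2.2 ≤ b.2.2))) := by
  simp [pvKey, Prod.Lex.le_iff]

lemma pvKey_lt_iff (a b : Int × Int × Int) :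
    pvKey a < pvKey b ↔
      a.1 < b.1 ∨ (a.1 = b.1 ∧ (a.2.1 < b.2.1 ∨ (a.2.1 = b.2.1 ∧ a.2.2 < b.2.2))) := by
  simp [pvKey, Prod.Lex.lt_iff]

-- A's scan over one row, position lower bounds, pairwise position order
lemma pvRow_fst (i : Int) (row : List Int) : ∀ c ∈ pvRow i row, c.2.1 = i := by
  intro c hc
  simp only [pvRow, List.mem_map] at hc
  obtain ⟨q, _, rfl⟩ := hc; rfl

lemma pvRow_pairwise (i : Int) (row : List Int) : (pvRow i row).Pairwise pvPosLt := by
  refine List.Pairwise.map _ ?_ (PySem.List.pairwise_lt_enumerate row 0)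
  intro p q h
  exact Or.inr ⟨rfl, h⟩

lemma pvCellsFrom_cons (s : Int) (x : List Int) (xs : List (List Int)) :
    pvCellsFrom s (x :: xs) = pvRow s x ++ pvCellsFrom (s+1) xs := by
  simp [pvCellsFrom, PySem.List.enumerate_cons]

lemma pvCellsFrom_fst_ge (s : Int) (tab : List (List Int)) :
    ∀ c ∈ pvCellsFrom s tab, s ≤ c.2.1 := by
  induction tab generalizing s with
  | nil => intro c hc; simp [pvCellsFrom, PySem.List.enumerate_nil] at hc
  | cons x xs ih =>
    intro c hc
    rw [pvCellsFrom_cons, List.mem_append] at hc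
    rcases hc with hc | hc
    · rw [pvRow_fst s x c hc]
    · have := ih (s+1) c hc; omega

lemma pvCellsFrom_pairwise (s : Int) (tab : List (List Int)) :
    (pvCellsFrom s tab).Pairwise pvPosLt := by
  induction tab generalizing s with
  | nil => simp [pvCellsFrom, PySem.List.enumerate_nil]
  | cons x xs ih =>
    rw [pvCellsFrom_cons, List.pairwise_append]
    refine ⟨pvRow_pairwise s x, ih (s+1), ?_⟩
    intro a ha b hb
    have h1 := pvRow_fst s x a ha
    have h2 := pvCellsFrom_fst_ge (s+1) xs b hb
    exact Or.inl (by omega)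

-- bounds of a cell's coordinates
lemma pvCellsFrom_mem_bounds (s : Int) (tab : List (List Int)) (c : Int × Int × Int)
    (h : c ∈ pvCellsFrom s tab) :
    ∃ (a b : Nat) (ha : a < tab.length),
      c.2.1 = s + (a : Int) ∧ c.2.2 = (b : Int) ∧ b < (tab[a]'ha).length := by
  induction tab generalizing s with
  | nil => simp [pvCellsFrom, PySem.List.enumerate_nil] at h
  | cons x xs ih =>
    rw [pvCellsFrom_cons, List.mem_append] at h
    rcases h with h | h
    · simp only [pvRow, List.mem_map] at h
      obtain ⟨q, hq, rfl⟩ := h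
      rw [PySem.List.mem_enumerate_iff] at hq
      obtain ⟨k, hk, rfl⟩ := hq
      exact ⟨0, k, by simp, by simp, by simp, by simpa using hk⟩
    · obtain ⟨a, b, ha, h1, h2, h3⟩ := ih (s+1) h
      refine ⟨a+1, b, by simpa using ha, by rw [h1]; push_cast; ring, h2, by simpa using h3⟩

-- the fold of A's inner scan: either nothing qualifies, or it returns the key-least qualifier
lemma pvFold_spec (cs : List (Int × Int × Int)) (s : Int × Int × Int)
    (hp : cs.Pairwise pvPosLt) :
    (cs.foldl pvStep s = s ∧ ∀ c ∈ cs, ¬(c.1 < s.1 ∧ c.1 ≠ -1)) ∨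
    (∃ c ∈ cs, (c.1 < s.1 ∧ c.1 ≠ -1) ∧ cs.foldl pvStep s = c ∧
       ∀ c' ∈ cs, c'.1 < s.1 → c'.1 ≠ -1 → pvKey c ≤ pvKey c') := by
  induction cs generalizing s with
  | nil => left; simp
  | cons c cs ih =>
    rw [List.pairwise_cons] at hp
    obtain ⟨hcall, hp⟩ := hp
    by_cases h : c.1 < s.1 ∧ c.1 ≠ -1
    · right
      rw [List.foldl_cons]
      have hstep : pvStep s c = c := by simp [pvStep, h]
      rw [hstep]
      rcases ih c hp with ⟨heq, hnone⟩ | ⟨c₂, hmem, hq, heq, hmin⟩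
      · refine ⟨c, List.mem_cons_self, h, heq, ?_⟩
        intro c' hc' h1 h2
        rcases List.mem_cons.mp hc' with rfl | hc'
        · rfl
        · have := hnone c' hc'
          have hle : c.1 ≤ c'.1 := by by_contra hlt; exact this ⟨by omega, h2⟩
          rcases lt_or_eq_of_le hle with hlt | heq1
          · exact le_of_lt ((pvKey_lt_iff c c').mpr (Or.inl hlt))
          · have hpos := hcall c' hc'
            unfold pvPosLt at hpos
            refine (pvKey_le_iff c c').mpr (Or.inr ⟨heq1, ?_⟩)
            rcases hpos with h' | h'
            · exact Or.inl h'
            · exact Or.inr ⟨h'.1, le_of_lt h'.2⟩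
      · refine ⟨c₂, List.mem_cons_of_mem _ hmem, ⟨by omega, hq.2⟩, heq, ?_⟩
        intro c' hc' h1 h2
        rcases List.mem_cons.mp hc' with rfl | hc'
        · exact le_of_lt ((pvKey_lt_iff c₂ c').mpr (Or.inl hq.1))
        · by_cases hlt : c'.1 < c.1
          · exact hmin c' hc' hlt h2
          · have : c₂.1 < c'.1 := by omega
            exact le_of_lt ((pvKey_lt_iff c₂ c').mpr (Or.inl this))
    · rw [List.foldl_cons]
      have hstep : pvStep s c = s := by simp only [pvStep, if_neg h]
      rw [hstep]
      rcases ih s hp with ⟨heq, hnone⟩ | ⟨c₂, hmem, hq, heq, hmin⟩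
      · left
        refine ⟨heq, ?_⟩
        intro c' hc'
        rcases List.mem_cons.mp hc' with rfl | hc'
        · exact h
        · exact hnone c' hc'
      · right
        refine ⟨c₂, List.mem_cons_of_mem _ hmem, hq, heq, ?_⟩
        intro c' hc' h1 h2
        rcases List.mem_cons.mp hc' with rfl | hc'
        · exact absurd ⟨h1, h2⟩ h
        · exact hmin c' hc' h1 h2

-- A's full scan is the fold of pvStep over the row-major cell list (rectangular tab)
lemma pvScanA_eq (tab : List (List Int)) (w : Nat)
    (hw : ∀ r ∈ tab, r.length = w) (hh : (PySem.List.pyGetD tab 0 []).length = w) :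
    pvScanA tab = (pvCells tab).foldl pvStep (400, -1, -1) := by
  have hlen : PySem.List.len (PySem.List.pyGetD tab 0 []) = (w : Int) := by
    rw [PySem.List.len_eq, hh]
  have hinner : ∀ (acc : Int × Int × Int), ∀ p ∈ PySem.List.enumerate tab 0,
      (fun (acc : Int × Int × Int) (p : Int × List Int) => (pvRow p.1 p.2).foldl pvStep acc) acc p =
      (fun (acc : Int × Int × Int) (p : Int × List Int) =>
        (PySem.List.pyRange 0 ((w : Nat) : Int) 1).foldl (fun s j =>
          if PySem.List.pyGetD p.2 j 0 < s.1 ∧ PySem.List.pyGetD p.2 j 0 ≠ -1 then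
            (PySem.List.pyGetD p.2 j 0, p.1, j) else s) acc) acc p := by
    intro acc p hp
    have hrow : p.2 ∈ tab := by
      have hm := PySem.List.map_snd_enumerate tab 0
      rw [← hm]
      exact List.mem_map_of_mem hp
    have hl : PySem.List.len p.2 = (w : Int) := by rw [PySem.List.len_eq, hw _ hrow]
    show (pvRow p.1 p.2).foldl pvStep acc = _
    rw [pvRow, List.foldl_map, PySem.List.enumerate_eq_map_pyRange p.2 0, List.foldl_map, hl]
    rfl
  rw [pvCells, pvCellsFrom, List.foldl_flatMap,
      PySem.List.foldl_congr_mem _ _ _ _ hinner,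
      PySem.List.enumerate_eq_map_pyRange tab [], List.foldl_map, pvScanA, hlen]

-- cell list of an updated grid: one row, then the whole grid
lemma pvEnumRow_set (i : Int) (row : List Int) (t : Int) (j : Nat) (v : Int) :
    (PySem.List.enumerate (row.set j v) t).map (fun q => ((q.2 : Int), i, q.1)) =
      ((PySem.List.enumerate row t).map (fun q => ((q.2 : Int), i, q.1))).map (pvUpd i (t + (j : Int)) v) := by
  induction row generalizing t j with
  | nil => simp [PySem.List.enumerate_nil]
  | cons r rs ih =>
    cases j with
    | zero =>
      simp only [List.set_cons_zero, PySem.List.enumerate_cons, List.map_cons, List.map_map]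
      refine List.cons_eq_cons.mpr ⟨?_, ?_⟩
      · simp [pvUpd]
      · rw [← List.map_map]
        have hid : ∀ c ∈ (PySem.List.enumerate rs (t+1)).map (fun q => ((q.2 : Int), i, q.1)),
            pvUpd i (t + (0:Nat)) v c = c := by
          intro c hc
          simp only [List.mem_map] at hc
          obtain ⟨q, hq, rfl⟩ := hc
          rw [PySem.List.mem_enumerate_iff] at hq
          obtain ⟨k, _, rfl⟩ := hq
          simp only [pvUpd]
          rw [if_neg (by push_cast; omega)]
        rw [List.map_congr_left hid, List.map_id']
    | succ j' =>
      simp only [List.set_cons_succ, PySem.List.enumerate_cons, List.map_cons, List.map_map]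
      refine List.cons_eq_cons.mpr ⟨?_, ?_⟩
      · simp only [pvUpd]
        rw [if_neg (by push_cast; omega)]
      · rw [← List.map_map, ih (t+1) j']
        congr 2
        push_cast; ring

lemma pvCellsFrom_set (s : Int) (tab : List (List Int)) (i0 j0 : Nat) (v : Int)
    (hi : i0 < tab.length) :
    pvCellsFrom s (tab.set i0 ((tab[i0]'hi).set j0 v)) =
      (pvCellsFrom s tab).map (pvUpd (s + (i0 : Int)) (j0 : Int) v) := by
  induction tab generalizing s i0 with
  | nil => simp at hi
  | cons x xs ih =>
    cases i0 with
    | zero =>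
      simp only [List.getElem_cons_zero, List.set_cons_zero]
      rw [pvCellsFrom_cons, pvCellsFrom_cons, List.map_append]
      refine congrArg₂ _ ?_ ?_
      · have := pvEnumRow_set s x 0 j0 v
        simpa [pvRow] using this
      · have hid : ∀ c ∈ pvCellsFrom (s+1) xs, pvUpd (s + (0:Nat)) (j0:Int) v c = c := by
          intro c hc
          have := pvCellsFrom_fst_ge (s+1) xs c hc
          simp only [pvUpd]
          rw [if_neg (by push_cast; omega)]
        rw [List.map_congr_left hid, List.map_id']
    | succ i0' =>
      simp only [List.getElem_cons_succ, List.set_cons_succ]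
      rw [pvCellsFrom_cons, pvCellsFrom_cons, List.map_append]
      refine congrArg₂ _ ?_ ?_
      · have hid : ∀ c ∈ pvRow s x, pvUpd (s + ((i0'+1:Nat):Int)) (j0:Int) v c = c := by
          intro c hc
          have := pvRow_fst s x c hc
          simp only [pvUpd]
          rw [if_neg (by push_cast; omega)]
        rw [List.map_congr_left hid, List.map_id']
      · rw [ih (s+1) i0' (by simpa using hi)]
        congr 2
        push_cast; ring

lemma pvV_set (tab : List (List Int)) (i0 j0 : Nat) (hi : i0 < tab.length) :
    pvV (tab.set i0 ((tab[i0]'hi).set j0 (-1))) =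
      (pvV tab).filter (fun c => decide ¬(c.2.1 = (i0 : Int) ∧ c.2.2 = (j0 : Int))) := by
  rw [pvV, pvCells, pvCellsFrom_set 0 tab i0 j0 (-1) hi, List.filter_map]
  have h1 : List.filter (pvValidB ∘ pvUpd (0 + (i0:Int)) ((j0:Nat):Int) (-1)) (pvCellsFrom 0 tab)
      = List.filter (fun c => pvValidB c && decide ¬(c.2.1 = (i0:Int) ∧ c.2.2 = (j0:Int))) (pvCellsFrom 0 tab) := by
    apply List.filter_congr
    intro c _
    by_cases hp : c.2.1 = (i0:Int) ∧ c.2.2 = (j0:Int)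
    · simp [pvUpd, hp, pvValidB]
    · simp only [Function.comp_apply, pvUpd, zero_add]
      rw [if_neg hp]
      simp [hp]
  rw [h1]
  have h2 : ∀ c ∈ List.filter (fun c => pvValidB c && decide ¬(c.2.1 = (i0:Int) ∧ c.2.2 = (j0:Int))) (pvCellsFrom 0 tab),
      pvUpd (0 + (i0:Int)) ((j0:Nat):Int) (-1) c = c := by
    intro c hc
    rw [List.mem_filter] at hc
    have := hc.2
    simp only [Bool.and_eq_true, decide_eq_true_eq] at this
    simp only [pvUpd, zero_add]
    rw [if_neg this.2]
  rw [List.map_congr_left h2, List.map_id', pvV, pvCells, List.filter_filter]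
  apply List.filter_congr
  intro c _
  rw [Bool.and_comm]

-- shape preservation
lemma pvRows_set (tab : List (List Int)) (w : Nat) (i0 j0 : Nat) (hi : i0 < tab.length)
    (hw : ∀ r ∈ tab, r.length = w) :
    ∀ r ∈ tab.set i0 ((tab[i0]'hi).set j0 (-1)), r.length = w := by
  intro r hr
  rcases List.mem_or_eq_of_mem_set hr with h | rfl
  · exact hw r h
  · rw [List.length_set]; exact hw _ (List.getElem_mem hi)

lemma pvSetD_neg_one {α : Type} (xs : List α) (v : α) (h : xs ≠ []) :
    PySem.List.pySetD xs (-1) v = xs.set (xs.length - 1) v := by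
  have h0 : xs.length ≠ 0 := by simpa using h
  simp only [PySem.List.pySetD, PySem.List.pySet?, PySem.List.pyIdx?]
  rw [if_neg (by omega : ¬ (0:Int) ≤ -1), if_pos (by omega : -(xs.length:Int) ≤ -1)]
  simp only [Option.map_some, Option.getD_some]
  norm_num

-- main loop invariant: A's loop produces sorted-take-pad
lemma pvMain (w : Nat) (hw0 : 0 < w) : ∀ (n : Nat) (tab : List (List Int)) (acc : List (Int × Int × Int)),
    tab ≠ [] → (∀ r ∈ tab, r.length = w) →
    pvLoopA n tab acc =
      acc ++ (PySem.List.sorted (pvV tab) pvKey false).take n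
          ++ List.replicate (n - (pvV tab).length) (400, -1, -1) := by
  intro n
  induction n with
  | zero => intro tab acc _ _; simp [pvLoopA]
  | succ n ih =>
    intro tab acc hne hw
    have hL0 : tab.length ≠ 0 := by simpa using hne
    have hh : (PySem.List.pyGetD tab 0 []).length = w := by
      apply hw
      cases tab with
      | nil => exact absurd rfl hne
      | cons x xs => simp [PySem.List.pyGetD_zero_cons]
    have hscan := pvScanA_eq tab w hw hh
    have hpw : (pvCells tab).Pairwise pvPosLt := pvCellsFrom_pairwise 0 tab
    cases hs : PySem.List.sorted (pvV tab) pvKey false with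
    | nil =>
      have hV : pvV tab = [] := (PySem.List.sorted_eq_nil_iff _ _ _).mp hs
      have hscan400 : pvScanA tab = (400, -1, -1) := by
        rcases pvFold_spec (pvCells tab) (400, -1, -1) hpw with ⟨heq, _⟩ | ⟨c, hmem, hq, _, _⟩
        · rw [hscan, heq]
        · exfalso
          have : c ∈ pvV tab := List.mem_filter.mpr ⟨hmem, by simp [pvValidB]; exact ⟨hq.1, hq.2⟩⟩
          rw [hV] at this
          exact List.not_mem_nil this
      -- the written-back cell is tab[-1][-1]
      have hlast_mem : tab.getLast hne ∈ tab := List.getLast_mem hne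
      have hlastlen : (tab.getLast hne).length = w := hw _ hlast_mem
      have hlast_ne : tab.getLast hne ≠ [] := by
        intro h0; rw [h0] at hlastlen; simp at hlastlen; omega
      have hrow : PySem.List.pyGetD tab (-1) [] = tab.getLast hne := PySem.List.pyGetD_neg_one _ _ hne
      have hgl : tab.getLast hne = tab[tab.length - 1]'(by omega) := List.getLast_eq_getElem hne
      have htab' : PySem.List.pySetD tab (-1)
            (PySem.List.pySetD (PySem.List.pyGetD tab (-1) []) (-1) (-1)) =
          tab.set (tab.length - 1) ((tab[tab.length - 1]'(by omega)).set (w - 1) (-1)) := by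
        rw [hrow, pvSetD_neg_one _ _ hlast_ne, pvSetD_neg_one _ _ hne, hgl]
        have hlen2 : (tab[tab.length - 1]'(by omega) : List Int).length = w := by
          rw [← hgl]; exact hlastlen
        rw [hlen2]
      have hV' : pvV (tab.set (tab.length - 1) ((tab[tab.length - 1]'(by omega)).set (w - 1) (-1))) = [] := by
        rw [pvV_set tab (tab.length - 1) (w - 1) (by omega), hV]
        simp
      have hne' : tab.set (tab.length - 1) ((tab[tab.length - 1]'(by omega)).set (w - 1) (-1)) ≠ [] := by
        apply List.ne_nil_of_length_pos
        rw [List.length_set]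
        omega
      have hw' := pvRows_set tab w (tab.length - 1) (w - 1) (by omega) hw
      simp only [pvLoopA]
      rw [hscan400]
      show pvLoopA n _ (acc ++ [((400:Int), (-1:Int), (-1:Int))]) = _
      rw [htab', ih _ _ hne' hw', hV', hV]
      have hsnil : PySem.List.sorted ([] : List (Int × Int × Int)) pvKey false = [] :=
        (PySem.List.sorted_eq_nil_iff _ _ _).mpr rfl
      rw [hsnil]
      simp [List.replicate_succ]
    | cons m rest =>
      have hmem_s : m ∈ pvV tab := by
        have : m ∈ PySem.List.sorted (pvV tab) pvKey false := by rw [hs]; exact List.mem_cons_self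
        exact (PySem.List.mem_sorted _ _ _ _).mp this
      have hmemc : m ∈ pvCells tab := List.mem_of_mem_filter hmem_s
      have hmv : m.1 < 400 ∧ m.1 ≠ -1 := by
        have := (List.mem_filter.mp hmem_s).2
        simpa [pvValidB] using this
      have hleast := PySem.List.key_head_sorted_le _ pvKey hs
      have hscanm : pvScanA tab = m := by
        rcases pvFold_spec (pvCells tab) (400, -1, -1) hpw with ⟨_, hnone⟩ | ⟨c₂, hmem2, hq2, heq2, hmin2⟩
        · exact absurd ⟨hmv.1, hmv.2⟩ (hnone m hmemc)
        · have hc2V : c₂ ∈ pvV tab :=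
            List.mem_filter.mpr ⟨hmem2, by simp [pvValidB]; exact ⟨hq2.1, hq2.2⟩⟩
          have h12 : pvKey m ≤ pvKey c₂ := hleast _ hc2V
          have h21 : pvKey c₂ ≤ pvKey m := hmin2 m hmemc hmv.1 hmv.2
          have hcm : c₂ = m := pvKey_inj (le_antisymm h21 h12)
          rw [hscan, heq2, hcm]
      obtain ⟨a, b, ha, hA1, hA2, hb⟩ := pvCellsFrom_mem_bounds 0 tab m hmemc
      rw [zero_add] at hA1
      -- the written-back cell is tab[a][b]
      have htab' : PySem.List.pySetD tab m.2.1
            (PySem.List.pySetD (PySem.List.pyGetD tab m.2.1 []) m.2.2 (-1)) =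
          tab.set a ((tab[a]'ha).set b (-1)) := by
        rw [hA1, hA2]
        rw [PySem.List.pyGetD_natCast, PySem.List.pySetD_natCast, PySem.List.pySetD_natCast,
            List.getD_eq_getElem _ _ ha]
      have hV' : pvV (tab.set a ((tab[a]'ha).set b (-1))) =
          (pvV tab).filter (fun c => decide ¬(c.2.1 = (a : Int) ∧ c.2.2 = (b : Int))) :=
        pvV_set tab a b ha
      have hpwV : (pvV tab).Pairwise pvPosLt := List.Pairwise.filter pvValidB hpw
      obtain ⟨l₁, l₂, hsplit⟩ := List.append_of_mem hmem_s
      have hl1 : ∀ x ∈ l₁, pvPosLt x m := by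
        have := hsplit ▸ hpwV
        rw [List.pairwise_append] at this
        exact fun x hx => this.2.2 x hx m List.mem_cons_self
      have hl2 : ∀ x ∈ l₂, pvPosLt m x := by
        have := hsplit ▸ hpwV
        rw [List.pairwise_append, List.pairwise_cons] at this
        exact this.2.1.1
      have hfilter : (pvV tab).filter (fun c => decide ¬(c.2.1 = (a : Int) ∧ c.2.2 = (b : Int))) = l₁ ++ l₂ := by
        rw [hsplit, List.filter_append, List.filter_cons]
        have hmfalse : (decide ¬(m.2.1 = (a : Int) ∧ m.2.2 = (b : Int))) = false := by
          simp [hA1, hA2]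
        rw [hmfalse]
        simp only [Bool.false_eq_true, if_false]
        refine congrArg₂ _ ?_ ?_
        · apply List.filter_eq_self.mpr
          intro x hx
          have hp := hl1 x hx
          unfold pvPosLt at hp
          simp only [decide_eq_true_eq]
          intro hc
          rw [hc.1, hc.2, ← hA1, ← hA2] at hp
          omega
        · apply List.filter_eq_self.mpr
          intro x hx
          have hp := hl2 x hx
          unfold pvPosLt at hp
          simp only [decide_eq_true_eq]
          intro hc
          rw [hc.1, hc.2, ← hA1, ← hA2] at hp
          omega
      have hp1 : (m :: rest).Perm (pvV tab) := by
        rw [← hs]; exact PySem.List.sorted_perm _ _ _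
      have hperm : rest.Perm (l₁ ++ l₂) := by
        have hp2 : (pvV tab).Perm (m :: (l₁ ++ l₂)) := by rw [hsplit]; exact List.perm_middle
        exact List.Perm.cons_inv (hp1.trans hp2)
      have hrestlt : rest.Pairwise (fun x y => pvKey x < pvKey y) := by
        have hle : (m :: rest).Pairwise (fun x y => pvKey x ≤ pvKey y) := by
          have := PySem.List.sorted_pairwise (pvV tab) pvKey
          rwa [hs] at this
        have hneK : (pvV tab).Pairwise (fun x y => pvKey x ≠ pvKey y) := by
          refine hpwV.imp ?_
          intro x y hxy hk
          have := pvKey_inj hk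
          subst this
          unfold pvPosLt at hxy
          omega
        have hneK' : (m :: rest).Pairwise (fun x y => pvKey x ≠ pvKey y) :=
          (List.Perm.pairwise_iff (fun h => Ne.symm h) hp1).mpr hneK
        have hlt : (m :: rest).Pairwise (fun x y => pvKey x < pvKey y) :=
          (hle.and hneK').imp (fun h => lt_of_le_of_ne h.1 h.2)
        exact (List.pairwise_cons.mp hlt).2
      have hsorted' : PySem.List.sorted (pvV (tab.set a ((tab[a]'ha).set b (-1)))) pvKey false = rest := by
        rw [hV', hfilter]
        exact PySem.List.sorted_eq_of_perm_of_pairwise_lt _ rest pvKey hperm hrestlt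
      have hne' : tab.set a ((tab[a]'ha).set b (-1)) ≠ [] := by
        apply List.ne_nil_of_length_pos
        rw [List.length_set]
        omega
      have hw' := pvRows_set tab w a b ha hw
      have hlenV : (pvV tab).length = rest.length + 1 := by
        rw [← PySem.List.length_sorted (pvV tab) pvKey false, hs, List.length_cons]
      simp only [pvLoopA]
      rw [hscanm]
      show pvLoopA n _ (acc ++ [(m.1, m.2.1, m.2.2)]) = _
      rw [htab', ih _ _ hne' hw', hsorted', hV', hfilter, hlenV]
      have hmeta : (m.1, m.2.1, m.2.2) = m := rfl
      rw [hmeta]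
      have hlen2 : (l₁ ++ l₂).length = rest.length := hperm.symm.length_eq
      rw [hlen2]
      simp [List.take_succ_cons, List.append_assoc, Nat.succ_sub_succ]

-- B's comprehension builds exactly pvV
lemma pvAltCells (tab : List (List Int)) :
    ((PySem.List.enumerate tab 0).flatMap (fun p =>
      ((PySem.List.enumerate p.2 0).filter (fun q => decide (q.2 < 400 ∧ q.2 ≠ -1))).map
        (fun q => (q.2, p.1, q.1)))) = pvV tab := by
  rw [pvV, pvCells, pvCellsFrom, List.filter_flatMap]
  congr 1
  funext p
  rw [pvRow, List.filter_map]
  rfl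

-- ===== VERDICT (by name: the statement is the Claim_ definition above) =====
theorem getKMin_spec : Claim_equal_getKMin := by
  intro tab k _ hpre
  unfold Spec_getKMin getKMin getKMin_alt
  rw [pvAltCells]
  show pvLoopA k.toNat tab [] =
    PySem.List.slice (PySem.List.sorted (pvV tab) pvKey false) none (some (max k 0)) ++
      PySem.List.pyRepeat [((400:Int), (-1:Int), (-1:Int))]
        (max k 0 - PySem.List.len (PySem.List.sorted (pvV tab) pvKey false))
  by_cases hk : k ≤ 0
  · have hk0 : k.toNat = 0 := Int.toNat_of_nonpos hk
    rw [hk0, max_eq_right hk, PySem.List.slice_to _ (le_refl 0), PySem.List.pyRepeat_singleton]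
    have : ((0 : Int) - PySem.List.len (PySem.List.sorted (pvV tab) pvKey false)).toNat = 0 := by
      rw [PySem.List.len_eq]
      omega
    rw [this]
    simp [pvLoopA]
  · rcases hpre with hpre | ⟨hne, hh0, hw⟩
    · exact absurd hpre hk
    have hw0 : 0 < (tab.headD []).length := List.length_pos_of_ne_nil hh0
    rw [pvMain (tab.headD []).length hw0 k.toNat tab [] hne hw]
    rw [max_eq_left (by omega), PySem.List.slice_to _ (by omega : (0:Int) ≤ k),
        PySem.List.pyRepeat_singleton, PySem.List.len_eq, PySem.List.length_sorted]
    have : (k - ((pvV tab).length : Int)).toNat = k.toNat - (pvV tab).length := by omega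
    rw [this]
    simp
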